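-- pv_equiv track=rewrite | github.com/ra8in/mpl-richtext | mpl_richtext/utils.py | format_nepali_number
-- ===== SOURCE A (Python) =====
-- def format_nepali_number(number):
--     """
--     Format a number using the Nepali/Indian numbering system.
--
--     Uses the 3-2-2... grouping pattern from right to left.
--     Handles already-formatted input by stripping existing commas first.
--
--     Args:
--         number: int, float, or string representing a number.
--                 Can include existing comma formatting.
--
--     Returns:
--         str: The number formatted with Nepali-style comma placement.
--
--     Examples:
--         >>> format_nepali_number(2553871)
--         '25,53,871'
--         >>> format_nepali_number("2,553,871")  # Western format → Nepali
--         '25,53,871'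
--         >>> format_nepali_number(1234567.89)
--         '12,34,567.89'
--         >>> format_nepali_number(-2553871)
--         '-25,53,871'
--     """
--     # Convert to string and strip existing commas
--     num_str = str(number).replace(',', '')
--
--     # Handle negative numbers
--     is_negative = num_str.startswith('-')
--     if is_negative:
--         num_str = num_str[1:]
--
--     # Separate integer and decimal parts
--     if '.' in num_str:
--         integer_part, decimal_part = num_str.split('.', 1)
--     else:
--         integer_part = num_str
--         decimal_part = None
--
--     # Apply Nepali grouping: first 3 digits from right, then 2 digits each
--     if len(integer_part) <= 3:
--         formatted = integer_part
--     else: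
--         # Take last 3 digits
--         result = [integer_part[-3:]]
--         remaining = integer_part[:-3]
--
--         # Group remaining digits in pairs of 2 from right to left
--         while len(remaining) > 2:
--             result.insert(0, remaining[-2:])
--             remaining = remaining[:-2]
--
--         # Add any remaining digits (1 or 2)
--         if remaining:
--             result.insert(0, remaining)
--
--         formatted = ','.join(result)
--
--     # Rejoin with decimal part if present
--     if decimal_part is not None:
--         formatted = f"{formatted}.{decimal_part}"
--
--     # Add negative sign back
--     if is_negative:
--         formatted = f"-{formatted}"
--
--     return formatted
-- ===== SOURCE B (Python) =====
-- def format_nepali_number(number):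
--     num_str = str(number).replace(',', '')
--     is_negative = num_str.startswith('-')
--     if is_negative:
--         num_str = num_str[1:]
--     dot = num_str.find('.')
--     if dot != -1:
--         integer_part = num_str[:dot]
--         rest = num_str[dot:]
--     else:
--         integer_part = num_str
--         rest = ''
--     n = len(integer_part)
--     formatted = ''.join(
--         (',' + c) if (i > 0 and n - i >= 3 and (n - i) % 2 == 1) else c
--         for i, c in enumerate(integer_part)
--     )
--     out = formatted + rest
--     if is_negative:
--         out = '-' + out
--     return out
-- ===== Notes on version B (the rewrite author's own statement) =====
-- stated objective: faster
-- what changed: A builds a list of 3/2/2 chunks right-to-left with list.insert(0, ...) and repeated slicing and then joins them; B makes a single left-to-right pass over the integer part, inserting a comma before each character whose distance to the end is odd and at least 3, and keeps the decimal part by slicing at the first decimal point instead of a maxsplit split.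
import Mathlib
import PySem

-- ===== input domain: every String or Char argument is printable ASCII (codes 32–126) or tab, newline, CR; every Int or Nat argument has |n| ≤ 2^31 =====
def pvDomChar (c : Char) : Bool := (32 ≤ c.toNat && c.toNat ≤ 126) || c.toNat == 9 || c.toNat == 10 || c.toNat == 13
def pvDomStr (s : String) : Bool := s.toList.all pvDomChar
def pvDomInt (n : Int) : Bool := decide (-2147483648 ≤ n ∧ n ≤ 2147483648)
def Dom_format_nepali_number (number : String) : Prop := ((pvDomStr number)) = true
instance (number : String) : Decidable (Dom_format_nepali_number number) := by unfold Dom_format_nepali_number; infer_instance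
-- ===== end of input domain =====

-- B replaces A's right-to-left chunking loop (list of chunks built with insert(0,...)
-- and repeated slicing, then joined) by a single left-to-right pass that inserts a comma
-- before every character whose distance to the end of the integer part is odd and ≥ 3
-- (objective: faster — one linear pass instead of A's quadratic chunk loop).

-- termination helpers for the ports' loops (negative-index slices as take/drop)
theorem pvSliceToNeg2 (l : List Char) : PySem.List.slice l none (some (-2)) = l.take (l.length - 2) := by
  simp [PySem.List.slice]
def fnnLoopA (remaining : List Char) (res : List (List Char)) : List (List Char) :=
  if 2 < remaining.length then
    fnnLoopA (PySem.List.slice remaining none (some (-2)))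
      (PySem.List.slice remaining (some (-2)) none :: res)
  else if remaining.isEmpty then res else remaining :: res
termination_by remaining.length
decreasing_by
  rw [pvSliceToNeg2]; simp; omega

def format_nepali_number (number : String) : String :=
  -- num_str = str(number).replace(',', '')   (input is already a string)
  let numStr0 := PySem.Chars.replace number.toList [','] []
  -- is_negative = num_str.startswith('-'); if is_negative: num_str = num_str[1:]
  let isNeg := PySem.Chars.startswith numStr0 ['-']
  let numStr := if isNeg then PySem.List.slice numStr0 (some 1) none else numStr0
  -- if '.' in num_str: integer_part, decimal_part = num_str.split('.', 1)
  let parts :=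
    if PySem.Chars.isIn ['.'] numStr then
      match PySem.Chars.splitOnMax numStr ['.'] 1 with
      | ip :: dp :: _ => (ip, some dp)
      | _ => ([], none)          -- unreachable: split on a present separator gives two parts
    else (numStr, none)
  let integerPart := parts.1
  -- grouping: last 3, then pairs of 2 (right to left), joined with ','
  let formatted :=
    if integerPart.length ≤ 3 then integerPart
    else PySem.Chars.join [',']
      (fnnLoopA (PySem.List.slice integerPart none (some (-3)))
        [PySem.List.slice integerPart (some (-3)) none])
  -- rejoin decimal part, re-add the sign
  let formatted := match parts.2 with
    | some dp => formatted ++ ['.'] ++ dp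
    | none => formatted
  String.ofList (if isNeg then '-' :: formatted else formatted)

-- ===== PORT B =====

def format_nepali_number_alt (number : String) : String :=
  let numStr0 := PySem.Chars.replace number.toList [','] []
  let isNeg := PySem.Chars.startswith numStr0 ['-']
  let numStr := if isNeg then PySem.List.slice numStr0 (some 1) none else numStr0
  -- dot = num_str.find('.')
  let dot := PySem.Chars.find numStr ['.']
  let parts :=
    if dot ≠ -1 then
      (PySem.List.slice numStr none (some dot), PySem.List.slice numStr (some dot) none)
    else (numStr, ([] : List Char))
  let integerPart := parts.1
  let n : Int := integerPart.length
  -- ''.join((',' + c) if (i > 0 and n - i >= 3 and (n - i) % 2 == 1) else c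
  --         for i, c in enumerate(integer_part))
  let formatted := (PySem.List.enumerate integerPart).flatMap
    (fun p => if 0 < p.1 ∧ 3 ≤ n - p.1 ∧ PySem.Int.mod (n - p.1) 2 = 1 then [',', p.2] else [p.2])
  let out := formatted ++ parts.2
  String.ofList (if isNeg then '-' :: out else out)

-- ===== PRECONDITION & SPEC =====
def Spec_format_nepali_number (number : String) (out : String) : Prop := out = format_nepali_number_alt number
instance (number : String) (out : String) : Decidable (Spec_format_nepali_number number out) := by unfold Spec_format_nepali_number; infer_instance

-- ===== CLAIM (what is proved, stated in full; the proofs are below) =====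
def Claim_equal_format_nepali_number : Prop := ∀ (number : String), Dom_format_nepali_number number → Spec_format_nepali_number number (format_nepali_number number)

-- ===== LEMMAS AND PROOFS =====

theorem pvSliceFromNeg2 (l : List Char) : PySem.List.slice l (some (-2)) none = l.drop (l.length - 2) := by
  simp [PySem.List.slice]
theorem pvSliceToNeg3 (l : List Char) : PySem.List.slice l none (some (-3)) = l.take (l.length - 3) := by
  simp [PySem.List.slice]
theorem pvSliceFromNeg3 (l : List Char) : PySem.List.slice l (some (-3)) none = l.drop (l.length - 3) := by
  simp [PySem.List.slice]

-- ===== PORT A =====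

-- while len(remaining) > 2: result.insert(0, remaining[-2:]); remaining = remaining[:-2]
-- then: if remaining: result.insert(0, remaining)

def pvFirstDot : List Char → Nat
  | [] => 0
  | c :: t => if c = '.' then 0 else pvFirstDot t + 1

theorem pvFirstDot_get (l : List Char) (h : '.' ∈ l) : l[pvFirstDot l]? = some '.' := by
  induction l with
  | nil => simp at h
  | cons c t ih =>
    by_cases hc : c = '.'
    · simp [pvFirstDot, hc]
    · have ht : '.' ∈ t := by
        rcases List.mem_cons.mp h with h1 | h1
        · exact absurd h1.symm hc
        · exact h1
      simp [pvFirstDot, hc, ih ht]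

theorem pvFirstDot_min (l : List Char) (i : Nat) (h : i < pvFirstDot l) : l[i]? ≠ some '.' := by
  induction l generalizing i with
  | nil => simp [pvFirstDot] at h
  | cons c t ih =>
    by_cases hc : c = '.'
    · simp [pvFirstDot, hc] at h
    · cases i with
      | zero => simpa using hc
      | succ j =>
        simp only [pvFirstDot, if_neg hc] at h
        simpa using ih j (by omega)

theorem pvFirstDot_lt (l : List Char) (h : '.' ∈ l) : pvFirstDot l < l.length := by
  have := pvFirstDot_get l h
  exact List.getElem?_eq_some_iff.mp this |>.1

theorem pvDotPrefix (l : List Char) (i : Nat) : (['.'] <+: l.drop i) ↔ l[i]? = some '.' := by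
  rw [← List.head?_drop]
  constructor
  · rintro ⟨t, ht⟩; rw [← ht]; rfl
  · intro h
    cases hd : l.drop i with
    | nil => simp [hd] at h
    | cons a t => simp [hd] at h; exact ⟨t, by simp [h]⟩

theorem pvMemDot (l : List Char) : '.' ∈ l ↔ ['.'] <:+: l := by
  rw [← PySem.Chars.isIn_iff_infix, ← PySem.Chars.exists_prefix_drop_iff_isIn]
  constructor
  · intro h
    exact ⟨pvFirstDot l, (pvDotPrefix l _).mpr (pvFirstDot_get l h)⟩
  · rintro ⟨j, hj⟩
    have := (pvDotPrefix l j).mp hj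
    exact List.mem_of_getElem? this

theorem pvFind_dot (l : List Char) (h : '.' ∈ l) : PySem.Chars.find l ['.'] = (pvFirstDot l : Int) := by
  have h0 : 0 ≤ PySem.Chars.find l ['.'] := (PySem.Chars.find_nonneg_iff l ['.']).mpr ((pvMemDot l).mp h)
  obtain ⟨hpre, hmin⟩ := PySem.Chars.find_spec h0
  have hk : l[(PySem.Chars.find l ['.']).toNat]? = some '.' := (pvDotPrefix l _).mp hpre
  have heq : (PySem.Chars.find l ['.']).toNat = pvFirstDot l := by
    rcases lt_trichotomy (PySem.Chars.find l ['.']).toNat (pvFirstDot l) with hlt | he | hgt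
    · exact absurd hk (pvFirstDot_min l _ hlt)
    · exact he
    · exact absurd ((pvDotPrefix l _).mpr (pvFirstDot_get l h)) (hmin _ hgt)
  omega

theorem pvFind_no_dot (l : List Char) (h : '.' ∉ l) : PySem.Chars.find l ['.'] = -1 :=
  (PySem.Chars.find_eq_neg_one_iff l ['.']).mpr (fun hin => h ((pvMemDot l).mpr hin))

theorem pvIsIn_dot (l : List Char) : PySem.Chars.isIn ['.'] l = true ↔ '.' ∈ l := by
  rw [PySem.Chars.isIn_iff_infix]
  exact (pvMemDot l).symm

theorem pvGo0 (fuel : Nat) (l cur : List Char) (acc : List (List Char)) (hf : 0 < fuel) :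
    PySem.Chars.splitOnMax.go ['.'] fuel 0 l cur acc = acc.reverse ++ [cur.reverse ++ l] := by
  cases fuel with
  | zero => omega
  | succ f =>
    cases l with
    | nil => simp [PySem.Chars.splitOnMax.go]
    | cons c t => simp [PySem.Chars.splitOnMax.go]

theorem pvGo1 (fuel : Nat) (l cur : List Char) (acc : List (List Char)) (hf : l.length < fuel) :
    PySem.Chars.splitOnMax.go ['.'] fuel 1 l cur acc =
      if '.' ∈ l then
        acc.reverse ++ [cur.reverse ++ l.take (pvFirstDot l), l.drop (pvFirstDot l + 1)]
      else acc.reverse ++ [cur.reverse ++ l] := by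
  induction fuel generalizing l cur acc with
  | zero => omega
  | succ f ih =>
    cases l with
    | nil => simp [PySem.Chars.splitOnMax.go]
    | cons c t =>
      by_cases hc : c = '.'
      · subst hc
        have hpre : List.isPrefixOf ['.'] ('.' :: t) = true := by simp [List.isPrefixOf]
        simp only [PySem.Chars.splitOnMax.go, hpre, if_true]
        rw [if_neg one_ne_zero]
        simp only [List.length_cons, List.length_nil, Nat.zero_add, List.drop_succ_cons,
          List.drop_zero]
        rw [show (1 : Nat) - 1 = 0 from rfl,
          pvGo0 f t [] (cur.reverse :: acc) (by simp at hf; omega)]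
        rw [if_pos (List.mem_cons_self)]
        simp [pvFirstDot]
      · have hpre : List.isPrefixOf ['.'] (c :: t) = false := by
          simp [List.isPrefixOf]
          exact fun h => hc h.symm
        simp only [PySem.Chars.splitOnMax.go, hpre, Bool.false_eq_true, if_false]
        rw [if_neg one_ne_zero,
          ih t (c :: cur) acc (by simp at hf ⊢; omega)]
        by_cases ht : '.' ∈ t
        · rw [if_pos ht, if_pos (List.mem_cons_of_mem c ht)]
          simp [pvFirstDot, hc]
        · rw [if_neg ht, if_neg (by
            intro hm
            rcases List.mem_cons.mp hm with h1 | h1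
            · exact hc h1.symm
            · exact ht h1)]
          simp

theorem pvSplit_dot (l : List Char) (h : '.' ∈ l) :
    PySem.Chars.splitOnMax l ['.'] 1 = [l.take (pvFirstDot l), l.drop (pvFirstDot l + 1)] := by
  rw [PySem.Chars.splitOnMax]
  rw [if_neg (by norm_num)]
  rw [show (1 : Int).toNat = 1 from rfl]
  rw [pvGo1 (l.length + 1) l [] [] (by omega), if_pos h]
  simp

def pvBFrom (n : Nat) : Nat → List Char → List Char
  | _, [] => []
  | i, c :: t => (if 0 < i ∧ 3 ≤ n - i ∧ (n - i) % 2 = 1 then [',', c] else [c]) ++ pvBFrom n (i + 1) t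

theorem pvBFrom_stop (l : List Char) (n i : Nat) (h : n - i ≤ 2) : pvBFrom n i l = l := by
  induction l generalizing i with
  | nil => rfl
  | cons c t ih =>
    simp only [pvBFrom]
    rw [if_neg (by omega), ih (i+1) (by omega)]
    rfl

theorem pvBFrom_shift (l : List Char) (n g j : Nat) (hj : 1 ≤ j) :
    pvBFrom n (g + j) l = pvBFrom (n - g) j l := by
  induction l generalizing j with
  | nil => rfl
  | cons c t ih =>
    simp only [pvBFrom]
    rw [show g + j + 1 = g + (j+1) by omega, ih (j+1) (by omega)]
    congr 1
    have : (0 < g + j ∧ 3 ≤ n - (g+j) ∧ (n - (g+j)) % 2 = 1) ↔ (0 < j ∧ 3 ≤ n - g - j ∧ (n - g - j) % 2 = 1) := by omega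
    simp only [this]

theorem pvBFrom_append (a b : List Char) (n i : Nat) :
    pvBFrom n i (a ++ b) = pvBFrom n i a ++ pvBFrom n (i + a.length) b := by
  induction a generalizing i with
  | nil => simp [pvBFrom]
  | cons c t ih => simp [pvBFrom, ih (i+1)]; rw [show i + (t.length + 1) = i + 1 + t.length by omega]

theorem pvBFrom_comma (r : List Char) (n g : Nat) (hg : 0 < g) (h3 : 3 ≤ n - g)
    (hodd : (n - g) % 2 = 1) (hr : r ≠ []) :
    pvBFrom n g r = ',' :: pvBFrom (n - g) 0 r := by
  cases r with
  | nil => exact absurd rfl hr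
  | cons c t =>
    simp only [pvBFrom]
    rw [if_pos ⟨hg, h3, hodd⟩, if_neg (by omega)]
    rw [pvBFrom_shift t n g 1 (le_refl 1)]
    rfl

def pvFL (l : List Char) : List Char :=
  if l.length ≤ 3 then l
  else
    (if l.length % 2 = 0 then l.take 1 ++ [','] ++ pvFL (l.drop 1)
     else l.take 2 ++ [','] ++ pvFL (l.drop 2))
termination_by l.length
decreasing_by all_goals (simp; omega)

theorem pvB_step (l : List Char) (s : Nat) (h3 : 3 < l.length)
    (hpar : (s = 1 ∧ l.length % 2 = 0) ∨ (s = 2 ∧ l.length % 2 = 1)) :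
    pvBFrom l.length 0 l = l.take s ++ [','] ++ pvBFrom (l.length - s) 0 (l.drop s) := by
  have hsplit := pvBFrom_append (l.take s) (l.drop s) l.length 0
  rw [List.take_append_drop] at hsplit
  rw [hsplit, List.length_take, Nat.zero_add, min_eq_left (by omega)]
  have htake : pvBFrom l.length 0 (l.take s) = l.take s := by
    rcases hpar with ⟨rfl, hp⟩ | ⟨rfl, hp⟩
    · rcases l with _ | ⟨c, t⟩
      · rfl
      · simp [pvBFrom]
    · rcases l with _ | ⟨c, _ | ⟨d, t⟩⟩
      · rfl
      · simp at h3
      · simp only [List.take_succ_cons, List.take_zero, pvBFrom]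
        rw [if_neg (by omega), if_neg (by simp at hp ⊢; omega)]
        rfl
  have hcomma : pvBFrom l.length s (l.drop s) = ',' :: pvBFrom (l.length - s) 0 (l.drop s) := by
    apply pvBFrom_comma
    · omega
    · omega
    · omega
    · intro hnil
      have := congrArg List.length hnil
      simp at this; omega
  rw [htake, hcomma]
  simp

theorem pvB_eq_fL (l : List Char) : pvBFrom l.length 0 l = pvFL l := by
  induction hn : l.length using Nat.strong_induction_on generalizing l with
  | _ n ih =>
  subst hn
  by_cases h3 : l.length ≤ 3
  · rw [pvFL, if_pos h3]
    cases l with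
    | nil => rfl
    | cons c t =>
      simp only [pvBFrom]
      rw [if_neg (by omega), pvBFrom_stop t _ 1 (by simp at h3 ⊢; omega)]
      rfl
  · rw [pvFL, if_neg h3]
    by_cases hp : l.length % 2 = 0
    · rw [if_pos hp, pvB_step l 1 (by omega) (Or.inl ⟨rfl, hp⟩)]
      have := ih (l.length - 1) (by omega) (l.drop 1) (by simp)
      rw [this]
    · rw [if_neg hp, pvB_step l 2 (by omega) (Or.inr ⟨rfl, by omega⟩)]
      have := ih (l.length - 2) (by omega) (l.drop 2) (by simp)
      rw [this]

def pvChunksR (l : List Char) : List (List Char) :=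
  if l.length ≤ 2 then (if l = [] then [] else [l])
  else pvChunksR (l.take (l.length - 2)) ++ [l.drop (l.length - 2)]
termination_by l.length
decreasing_by simp; omega

theorem pvChunksR_unfold (w : List Char) (hw : w ≠ []) :
    pvChunksR w = pvChunksR (w.take (w.length - 2)) ++ [w.drop (w.length - 2)] := by
  have h1 : 0 < w.length := List.length_pos_iff.mpr hw
  by_cases h2 : w.length ≤ 2
  · rw [pvChunksR, if_pos h2, if_neg hw, show w.length - 2 = 0 by omega]
    simp [pvChunksR]
  · rw [pvChunksR, if_neg h2]


theorem pvLoopA_eq (r : List Char) (res : List (List Char)) :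
    fnnLoopA r res = pvChunksR r ++ res := by
  induction hn : r.length using Nat.strong_induction_on generalizing r res with
  | _ n ih =>
  subst hn
  by_cases h2 : 2 < r.length
  · rw [fnnLoopA, if_pos h2, pvSliceToNeg2, pvSliceFromNeg2,
      ih (r.take (r.length - 2)).length (by simp; omega) _ _ rfl,
      pvChunksR_unfold r (by intro h; subst h; simp at h2)]
    simp
  · rw [fnnLoopA, if_neg h2]
    cases r with
    | nil => rw [pvChunksR]; simp
    | cons c t =>
      rw [pvChunksR]
      simp only [List.isEmpty_cons, Bool.false_eq_true, if_false]
      rw [if_pos (by simp at h2 ⊢; omega), if_neg (List.cons_ne_nil c t)]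
      simp
theorem pvChunksR_cons (l : List Char) (hl : l ≠ []) :
    pvChunksR l = l.take (if l.length % 2 = 0 then 2 else 1)
      :: pvChunksR (l.drop (if l.length % 2 = 0 then 2 else 1)) := by
  induction hn : l.length using Nat.strong_induction_on generalizing l with
  | _ n ih =>
  subst hn
  have h1 : 0 < l.length := List.length_pos_iff.mpr hl
  by_cases h2 : l.length ≤ 2
  · rw [pvChunksR, if_pos h2, if_neg hl]
    have hs : (if l.length % 2 = 0 then 2 else 1) = l.length := by split <;> omega
    rw [hs]
    simp [pvChunksR]
  · rw [pvChunksR_unfold l hl]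
    set s : Nat := if l.length % 2 = 0 then 2 else 1 with hs
    have hsle : s ≤ l.length - 2 := by simp only [hs]; split <;> omega
    have hu1 : l.take (l.length - 2) ≠ [] := by
      intro h; have := congrArg List.length h; simp at this; omega
    have hupar : (l.take (l.length - 2)).length % 2 = l.length % 2 := by simp; omega
    rw [ih (l.take (l.length - 2)).length (by simp; omega) _ hu1 rfl]
    have hss : (if (l.take (l.length - 2)).length % 2 = 0 then 2 else 1) = s := by
      rw [hupar]
    rw [hss, List.take_take, min_eq_left (by omega), List.cons_append]
    congr 1
    have hdt : (l.take (l.length - 2)).drop s = (l.drop s).take ((l.drop s).length - 2) := by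
      rw [List.drop_take]
      congr 1
      simp; omega
    have hdd : l.drop (l.length - 2) = (l.drop s).drop ((l.drop s).length - 2) := by
      rw [List.drop_drop]
      congr 1
      simp; omega
    rw [hdt, hdd,
      ← pvChunksR_unfold (l.drop s) (by intro h; have := congrArg List.length h; simp at this; omega)]

theorem pvJoin_cons (sep a : List Char) (t : List (List Char)) (ht : t ≠ []) :
    PySem.Chars.join sep (a :: t) = a ++ sep ++ PySem.Chars.join sep t := by
  cases t with
  | nil => exact absurd rfl ht
  | cons b t' => exact PySem.Chars.join_cons_cons ..

theorem pvA_core (w : List Char) (hw : 3 ≤ w.length) :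
    PySem.Chars.join [','] (pvChunksR (w.take (w.length - 3)) ++ [w.drop (w.length - 3)]) = pvFL w := by
  induction hn : w.length using Nat.strong_induction_on generalizing w with
  | _ n ih =>
  subst hn
  by_cases h3 : w.length ≤ 3
  · have he : w.length - 3 = 0 := by omega
    rw [he]
    simp only [List.take_zero, List.drop_zero]
    rw [pvChunksR]
    simp only [List.length_nil, Nat.zero_le, if_pos, List.nil_append]
    rw [PySem.Chars.join_singleton, pvFL, if_pos h3]
  · have hpar : (w.take (w.length - 3)).length % 2 = (w.length + 1) % 2 := by
      simp; omega
    by_cases hev : w.length % 2 = 0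
    · -- even length: first group has 1 char
      have hu : w.take (w.length - 3) ≠ [] := by
        intro h; have := congrArg List.length h; simp at this; omega
      rw [pvChunksR_cons _ hu]
      rw [show (if (w.take (w.length - 3)).length % 2 = 0 then 2 else 1) = 1 from by
        rw [hpar]; rw [if_neg (by omega)]]
      rw [List.cons_append, pvJoin_cons _ _ _ (by simp),
        List.take_take, min_eq_left (by omega)]
      have hdt : (w.take (w.length - 3)).drop 1 = (w.drop 1).take ((w.drop 1).length - 3) := by
        rw [List.drop_take]; congr 1; simp; omega
      have hdd : w.drop (w.length - 3) = (w.drop 1).drop ((w.drop 1).length - 3) := by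
        rw [List.drop_drop]; congr 1; simp; omega
      rw [hdt, hdd, ih (w.drop 1).length (by simp; omega) _ (by simp; omega) rfl]
      conv_rhs => rw [pvFL, if_neg h3, if_pos hev]
    · -- odd length: first group has 2 chars
      have hu : w.take (w.length - 3) ≠ [] := by
        intro h; have := congrArg List.length h; simp at this; omega
      rw [pvChunksR_cons _ hu]
      rw [show (if (w.take (w.length - 3)).length % 2 = 0 then 2 else 1) = 2 from by
        rw [hpar]; rw [if_pos (by omega)]]
      rw [List.cons_append, pvJoin_cons _ _ _ (by simp),
        List.take_take, min_eq_left (by omega)]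
      have hdt : (w.take (w.length - 3)).drop 2 = (w.drop 2).take ((w.drop 2).length - 3) := by
        rw [List.drop_take]; congr 1; simp; omega
      have hdd : w.drop (w.length - 3) = (w.drop 2).drop ((w.drop 2).length - 3) := by
        rw [List.drop_drop]; congr 1; simp; omega
      rw [hdt, hdd, ih (w.drop 2).length (by simp; omega) _ (by simp; omega) rfl]
      conv_rhs => rw [pvFL, if_neg h3, if_neg hev]

theorem pvEnumFlat (t : List Char) (i n : Nat) :
    (PySem.List.enumerate t (i : Int)).flatMap
      (fun p => if 0 < p.1 ∧ 3 ≤ (n : Int) - p.1 ∧ PySem.Int.mod ((n : Int) - p.1) 2 = 1 then [',', p.2] else [p.2])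
      = pvBFrom n i t := by
  induction t generalizing i with
  | nil => simp [PySem.List.enumerate, pvBFrom]
  | cons c r ih =>
    rw [show PySem.List.enumerate (c :: r) (i : Int) = ((i : Int), c) :: PySem.List.enumerate r ((i : Int) + 1)
        from by simp [PySem.List.enumerate]]
    rw [List.flatMap_cons]
    have h1 : ((i : Int) + 1) = ((i + 1 : Nat) : Int) := by push_cast; ring
    rw [h1, ih (i + 1)]
    simp only [pvBFrom]
    congr 1
    have hiff : (0 < (i : Int) ∧ 3 ≤ (n : Int) - (i : Int) ∧ PySem.Int.mod ((n : Int) - (i : Int)) 2 = 1)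
        ↔ (0 < i ∧ 3 ≤ n - i ∧ (n - i) % 2 = 1) := by
      rw [PySem.Int.mod_eq_emod_of_pos (by norm_num)]
      omega
    simp only [hiff]

theorem pvGroup_eq (l : List Char) :
    (if l.length ≤ 3 then l
     else PySem.Chars.join [','] (fnnLoopA (PySem.List.slice l none (some (-3)))
            [PySem.List.slice l (some (-3)) none]))
    = (PySem.List.enumerate l).flatMap
        (fun p => if 0 < p.1 ∧ 3 ≤ (l.length : Int) - p.1 ∧ PySem.Int.mod ((l.length : Int) - p.1) 2 = 1
                  then [',', p.2] else [p.2]) := by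
  have henum : PySem.List.enumerate l = PySem.List.enumerate l ((0 : Nat) : Int) := by norm_num
  rw [henum, pvEnumFlat l 0 l.length, pvB_eq_fL l]
  by_cases h3 : l.length <= 3
  · rw [if_pos h3, pvFL, if_pos h3]
  · rw [if_neg h3, pvSliceToNeg3, pvSliceFromNeg3, pvLoopA_eq, pvA_core l (by omega)]

-- ===== VERDICT (by name: the statement is the Claim_ definition above) =====
theorem format_nepali_number_spec : Claim_equal_format_nepali_number := by
  unfold Claim_equal_format_nepali_number Spec_format_nepali_number
  intro number _
  simp only [format_nepali_number, format_nepali_number_alt]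
  set ns0 := PySem.Chars.replace number.toList [','] [] with hns0
  set neg := PySem.Chars.startswith ns0 ['-'] with hneg
  set ns := (if neg then PySem.List.slice ns0 (some 1) none else ns0) with hns
  have hcore : ∀ a b : List Char, a = b → (if neg then '-' :: a else a) = (if neg then '-' :: b else b) := by
    intro a b h; rw [h]
  by_cases hdot : '.' ∈ ns
  · have hin : PySem.Chars.isIn ['.'] ns = true := (pvIsIn_dot ns).mpr hdot
    have hfind : PySem.Chars.find ns ['.'] = (pvFirstDot ns : Int) := pvFind_dot ns hdot
    have hlt := pvFirstDot_lt ns hdot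
    rw [if_pos hin, pvSplit_dot ns hdot, hfind,
      if_pos (by omega : ((pvFirstDot ns : Int)) ≠ -1),
      PySem.List.slice_to ns (by omega : (0:Int) ≤ (pvFirstDot ns : Int)),
      PySem.List.slice_from ns (by omega : (0:Int) ≤ (pvFirstDot ns : Int))]
    simp only [Int.toNat_natCast]
    apply congrArg
    apply hcore
    have hdrop : ns.drop (pvFirstDot ns) = '.' :: ns.drop (pvFirstDot ns + 1) := by
      rw [List.drop_eq_getElem_cons hlt]
      have := pvFirstDot_get ns hdot
      rw [List.getElem?_eq_getElem hlt] at this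
      simp only [Option.some.injEq] at this
      rw [this]
    rw [hdrop, pvGroup_eq (ns.take (pvFirstDot ns))]
    simp
  · have hin : PySem.Chars.isIn ['.'] ns = false :=
      (PySem.Chars.isIn_eq_false_iff ['.'] ns).mpr (fun h => hdot ((pvMemDot ns).mpr h))
    have hfind : PySem.Chars.find ns ['.'] = -1 := pvFind_no_dot ns hdot
    rw [hin, hfind]
    simp only [Bool.false_eq_true, if_false, ne_eq, not_true_eq_false, if_false]
    apply congrArg
    apply hcore
    rw [pvGroup_eq ns]
    simp
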